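-- pv_equiv track=rewrite | github.com/flozz/rivalcfg | rivalcfg/handlers/range_choice.py | find_nearest_choice
-- ===== SOURCE A (Python) =====
-- def find_nearest_choice(choices, value):
--     """Find the nearest value from choice list.
--
--     :param list[int] choices: List of allowed values.
--     :param int value: the value to match with the ones of choices.
--
--     :rtype: int
--     :returns: The nearest value from choices.
--     """
--     nearest_delta = None
--     nearest_choice = None
--
--     for choice in sorted(choices):
--         delta = abs(choice - value)
--         if nearest_delta is None or delta < nearest_delta:
--             nearest_delta = delta
--             nearest_choice = choice
--
--     return nearest_choice
-- ===== SOURCE B (Python) =====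
-- def find_nearest_choice(choices, value):
--     """Walk the sorted choices until the first one >= value; the answer is
--     that element or its predecessor, whichever is closer (ties to the
--     smaller)."""
--     prev = None
--     for choice in sorted(choices):
--         if choice >= value:
--             if prev is None or choice - value < value - prev:
--                 return choice
--             return prev
--         prev = choice
--     return prev
-- ===== Notes on version B (the rewrite author's own statement) =====
-- stated objective: alternative
-- what changed: Instead of tracking a running minimum |delta| over the whole sorted list, B scans the sorted list only up to the first element >= value and decides between that element and its predecessor, returning early.
import Mathlib
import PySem

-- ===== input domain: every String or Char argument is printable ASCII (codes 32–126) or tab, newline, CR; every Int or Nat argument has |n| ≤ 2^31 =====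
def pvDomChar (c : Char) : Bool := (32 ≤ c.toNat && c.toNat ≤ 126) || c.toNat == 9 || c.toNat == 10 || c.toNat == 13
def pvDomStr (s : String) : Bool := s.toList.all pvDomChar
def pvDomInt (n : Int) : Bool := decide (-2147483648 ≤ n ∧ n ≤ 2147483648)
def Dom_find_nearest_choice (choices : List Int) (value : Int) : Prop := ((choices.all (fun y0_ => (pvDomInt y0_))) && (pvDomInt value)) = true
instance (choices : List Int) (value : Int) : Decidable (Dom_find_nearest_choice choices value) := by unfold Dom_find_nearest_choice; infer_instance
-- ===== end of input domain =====

-- B replaces A's running-minimum scan of the whole sorted list by an early-exit walk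
-- to the first sorted element ≥ value, deciding between it and its predecessor (alternative decomposition).


-- ===== PORT A =====
-- one loop step of A: state = (nearest_delta, nearest_choice)
def pvAStep (value : Int) (st : Option Int × Option Int) (choice : Int) : Option Int × Option Int :=
  let delta := |choice - value|
  match st.1 with
  | none => (some delta, some choice)
  | some nd => if delta < nd then (some delta, some choice) else st

def find_nearest_choice (choices : List Int) (value : Int) : Option Int :=
  ((PySem.List.sorted choices (fun x => x) false).foldl (pvAStep value) (none, none)).2

-- ===== PORT B =====
-- B's loop: walk the sorted list, `prev` = last element seen (< value so far)
def pvBWalk (value : Int) : Option Int → List Int → Option Int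
  | prev, [] => prev
  | prev, choice :: rest =>
    if choice ≥ value then
      match prev with
      | none => some choice
      | some p => if choice - value < value - p then some choice else some p
    else pvBWalk value (some choice) rest

def find_nearest_choice_alt (choices : List Int) (value : Int) : Option Int :=
  pvBWalk value none (PySem.List.sorted choices (fun x => x) false)

-- ===== PRECONDITION & SPEC =====
def Spec_find_nearest_choice (choices : List Int) (value : Int) (out : Option Int) : Prop := out = find_nearest_choice_alt choices value
instance (choices : List Int) (value : Int) (out : Option Int) : Decidable (Spec_find_nearest_choice choices value out) := by unfold Spec_find_nearest_choice; infer_instance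

-- ===== CLAIM (what is proved, stated in full; the proofs are below) =====
def Claim_equal_find_nearest_choice : Prop := ∀ (choices : List Int) (value : Int), Dom_find_nearest_choice choices value → Spec_find_nearest_choice choices value (find_nearest_choice choices value)

-- ===== LEMMAS AND PROOFS =====

-- Once A holds a delta d that no remaining element beats strictly, the state is frozen.
theorem pvA_frozen (value d ch : Int) (s : List Int)
    (h : ∀ x ∈ s, ¬ (|x - value| < d)) :
    s.foldl (pvAStep value) (some d, some ch) = (some d, some ch) := by
  induction s with
  | nil => rfl
  | cons c t ih =>
    have hc := h c (by simp)
    simp only [List.foldl, pvAStep]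
    rw [if_neg hc]
    exact ih (fun x hx => h x (by simp [hx]))

-- Main invariant: on a sorted tail s whose elements are all ≥ p, with p < value,
-- A's fold from state (value - p, p) agrees with B's walk with prev = p.
theorem pvAB_walk (value : Int) (s : List Int) :
    ∀ p : Int, s.Pairwise (· ≤ ·) → (∀ x ∈ s, p ≤ x) → p < value →
    (s.foldl (pvAStep value) (some (value - p), some p)).2 = pvBWalk value (some p) s := by
  induction s with
  | nil => intro p _ _ _; rfl
  | cons c t ih =>
    intro p hpw hge hpv
    have hpc : p ≤ c := hge c (by simp)
    have hct : ∀ x ∈ t, c ≤ x := (List.pairwise_cons.mp hpw).1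
    have hpwt : t.Pairwise (· ≤ ·) := (List.pairwise_cons.mp hpw).2
    by_cases hcv : c ≥ value
    · -- B returns here; A's state after c never changes again
      have habs : |c - value| = c - value := abs_of_nonneg (by omega)
      simp only [List.foldl, pvAStep, pvBWalk, if_pos hcv, habs]
      by_cases hlt : c - value < value - p
      · rw [if_pos hlt]
        have : t.foldl (pvAStep value) (some (c - value), some c) = (some (c - value), some c) := by
          apply pvA_frozen
          intro x hx
          have := hct x hx
          have : |x - value| = x - value := abs_of_nonneg (by omega)
          omega
        rw [this, if_pos hlt]
      · rw [if_neg hlt]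
        have : t.foldl (pvAStep value) (some (value - p), some p) = (some (value - p), some p) := by
          apply pvA_frozen
          intro x hx
          have := hct x hx
          have : |x - value| = x - value := abs_of_nonneg (by omega)
          omega
        rw [this, if_neg hlt]
    · -- c < value: A's new best is c; B's prev becomes c
      push_neg at hcv
      have habs : |c - value| = value - c := by rw [abs_sub_comm]; exact abs_of_nonneg (by omega)
      have hstate : pvAStep value (some (value - p), some p) c = (some (value - c), some c) := by
        simp only [pvAStep, habs]
        by_cases h : value - c < value - p
        · rw [if_pos h]
        · rw [if_neg h]
          have : p = c := by omega
          simp [this]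
      simp only [List.foldl, pvBWalk, if_neg (by omega : ¬ c ≥ value), hstate]
      exact ih c hpwt hct hcv

theorem pvAB_eq (value : Int) (s : List Int) (hpw : s.Pairwise (· ≤ ·)) :
    (s.foldl (pvAStep value) (none, none)).2 = pvBWalk value none s := by
  cases s with
  | nil => rfl
  | cons c t =>
    have hct : ∀ x ∈ t, c ≤ x := (List.pairwise_cons.mp hpw).1
    have hpwt : t.Pairwise (· ≤ ·) := (List.pairwise_cons.mp hpw).2
    by_cases hcv : c ≥ value
    · have habs : |c - value| = c - value := abs_of_nonneg (by omega)
      simp only [List.foldl, pvAStep, pvBWalk, if_pos hcv]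
      have : t.foldl (pvAStep value) (some |c - value|, some c) = (some |c - value|, some c) := by
        apply pvA_frozen
        intro x hx
        have := hct x hx
        have : |x - value| = x - value := abs_of_nonneg (by omega)
        omega
      rw [this]
    · push_neg at hcv
      have habs : |c - value| = value - c := by rw [abs_sub_comm]; exact abs_of_nonneg (by omega)
      simp only [List.foldl, pvAStep, pvBWalk, if_neg (by omega : ¬ c ≥ value), habs]
      exact pvAB_walk value t c hpwt hct hcv

-- ===== VERDICT (by name: the statement is the Claim_ definition above) =====
theorem find_nearest_choice_spec : Claim_equal_find_nearest_choice := by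
  intro choices value _
  unfold Spec_find_nearest_choice find_nearest_choice find_nearest_choice_alt
  exact pvAB_eq value _ (PySem.List.sorted_pairwise choices (fun x => x) )
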